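-- pv_equiv track=rewrite | github.com/Nobu0/Haskell-dlist-parser | tool/clean_tsv.py | remove_module_names
-- ===== SOURCE A (Python) =====
-- def remove_module_names(typ):
--     # 文字列を1文字ずつ走査して、モジュール名を安全に削除する
--     result = ""
--     token = ""
--     for ch in typ:
--         if ch.isalnum() or ch in "._'":
--             token += ch
--         else:
--             # トークンがモジュール名を含む場合
--             if "." in token:
--                 token = token.split(".")[-1]
--             result += token + ch
--             token = ""
--     # 最後のトークン処理
--     if token:
--         if "." in token:
--             token = token.split(".")[-1]
--         result += token
--     return result
-- ===== SOURCE B (Python) =====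
-- def remove_module_names(typ):
--     # Eager-deletion stack: a '.' always kills the token chars before it
--     # (a dotted token keeps only its last segment), so never emit dots and,
--     # on each '.', pop the trailing run of token characters off the output.
--     out = []
--     for ch in typ:
--         if ch == '.':
--             while out and (out[-1].isalnum() or out[-1] in "_'"):
--                 out.pop()
--         else:
--             out.append(ch)
--     return ''.join(out)
-- ===== Notes on version B (the rewrite author's own statement) =====
-- stated objective: alternative
-- what changed: B drops A's token accumulator entirely: it pushes every non-dot character onto an output stack and, on each '.', pops the trailing run of word characters off the stack (eager deletion), instead of A's buffer-a-token-then-split('.') pass.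
import Mathlib
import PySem

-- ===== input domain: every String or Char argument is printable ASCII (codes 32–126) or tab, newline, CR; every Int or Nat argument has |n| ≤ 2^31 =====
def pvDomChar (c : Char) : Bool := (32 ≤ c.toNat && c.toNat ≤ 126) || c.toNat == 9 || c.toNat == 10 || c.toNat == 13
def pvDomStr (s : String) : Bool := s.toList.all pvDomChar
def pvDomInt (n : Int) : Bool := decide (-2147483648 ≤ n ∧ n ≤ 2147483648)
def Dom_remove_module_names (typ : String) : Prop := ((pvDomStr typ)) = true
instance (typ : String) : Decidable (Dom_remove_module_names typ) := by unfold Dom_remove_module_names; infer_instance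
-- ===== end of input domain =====

-- B replaces A's buffer-a-token-then-split('.') loop by an eager-deletion output
-- stack (push every non-dot char; on '.', pop the trailing word-char run); same
-- O(n) cost, a genuinely different algorithm.


-- ===== PORT A =====
-- A's character test `ch.isalnum() or ch in "._'"` (exact on the ASCII domain)
def pvKey (c : Char) : Bool := PySem.Chars.isalnum c || c == '.' || c == '_' || c == '\''

-- A's `token.split(".")[-1] if "." in token else token`
def pvStripTok (t : List Char) : List Char :=
  if PySem.Chars.isIn ['.'] t then (PySem.Chars.splitOn t ['.']).getLastD [] else t

-- A's loop: state (result, token), one character at a time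
def pvALoop : List Char → List Char → List Char → List Char
  | [], res, tok => if tok.isEmpty then res else res ++ pvStripTok tok
  | c :: cs, res, tok =>
    if pvKey c then pvALoop cs res (tok ++ [c])
    else pvALoop cs (res ++ pvStripTok tok ++ [c]) []

def remove_module_names (typ : String) : String := String.ofList (pvALoop typ.toList [] [])

-- ===== PORT B =====
-- B's pop test `out[-1].isalnum() or out[-1] in "_'"`
def pvPopKey (c : Char) : Bool := PySem.Chars.isalnum c || c == '_' || c == '\''

-- B's `while out and popkey(out[-1]): out.pop()`; the stack keeps its top first
def pvPop : List Char → List Char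
  | [] => []
  | c :: cs => if pvPopKey c then pvPop cs else c :: cs

-- B's loop over the input; `out` is the stack, reversed at the end by ''.join
def pvBLoop : List Char → List Char → List Char
  | [], out => out.reverse
  | c :: cs, out => if c == '.' then pvBLoop cs (pvPop out) else pvBLoop cs (c :: out)

def remove_module_names_alt (typ : String) : String := String.ofList (pvBLoop typ.toList [])

-- ===== PRECONDITION & SPEC =====
def Spec_remove_module_names (typ : String) (out : String) : Prop := out = remove_module_names_alt typ
instance (typ : String) (out : String) : Decidable (Spec_remove_module_names typ out) := by unfold Spec_remove_module_names; infer_instance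

-- ===== CLAIM (what is proved, stated in full; the proofs are below) =====
def Claim_equal_remove_module_names : Prop := ∀ (typ : String), Dom_remove_module_names typ → Spec_remove_module_names typ (remove_module_names typ)

-- ===== LEMMAS AND PROOFS =====

def pvNotDot (c : Char) : Bool := !(c == '.')

-- the last '.'-separated segment of a list (chars after the last dot)
def pvLastSeg (l : List Char) : List Char := (l.reverse.takeWhile pvNotDot).reverse

theorem pvTw_all (l : List Char) (h : '.' ∉ l) : l.takeWhile pvNotDot = l := by
  apply List.takeWhile_eq_self_iff.mpr
  intro x hx
  simp only [pvNotDot, Bool.not_eq_true', beq_eq_false_iff_ne, ne_eq]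
  rintro rfl
  exact h hx

theorem pvTw_len_ne (l : List Char) (h : '.' ∈ l) :
    (l.takeWhile pvNotDot).length ≠ l.length := by
  intro hlen
  have heq : l.takeWhile pvNotDot = l :=
    (List.takeWhile_prefix pvNotDot).eq_of_length hlen
  have := List.takeWhile_eq_self_iff.mp heq '.' h
  simp [pvNotDot] at this

theorem pvLastSeg_snoc_dot (t : List Char) : pvLastSeg (t ++ ['.']) = [] := by
  unfold pvLastSeg
  rw [List.reverse_append]
  simp [pvNotDot]

theorem pvLastSeg_snoc (t : List Char) (c : Char) (hc : c ≠ '.') :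
    pvLastSeg (t ++ [c]) = pvLastSeg t ++ [c] := by
  unfold pvLastSeg
  rw [List.reverse_append]
  simp [pvNotDot, hc]

theorem pvLastSeg_cons_of_dot (c : Char) (rest : List Char) (h : '.' ∈ rest) :
    pvLastSeg (c :: rest) = pvLastSeg rest := by
  unfold pvLastSeg
  rw [List.reverse_cons, List.takeWhile_append,
    if_neg (pvTw_len_ne rest.reverse (List.mem_reverse.mpr h))]

theorem pvLastSeg_dot_cons (rest : List Char) (h : '.' ∉ rest) :
    pvLastSeg ('.' :: rest) = rest := by
  unfold pvLastSeg
  have hall := pvTw_all rest.reverse (fun hx => h (List.mem_reverse.mp hx))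
  rw [List.reverse_cons, List.takeWhile_append, if_pos (by rw [hall])]
  simp [pvNotDot]

-- splitOn.go with sep = ['.'] computes pvLastSeg in its last slot
theorem pvGo_last : ∀ (fuel : Nat) (l cur : List Char) (acc : List (List Char)),
    l.length < fuel →
    (PySem.Chars.splitOn.go ['.'] fuel l cur acc).getLastD [] =
      (if '.' ∈ l then pvLastSeg l else cur.reverse ++ l) := by
  intro fuel
  induction fuel with
  | zero => intro l cur acc h; omega
  | succ fuel ih =>
    intro l cur acc h
    cases l with
    | nil =>
      show ((cur.reverse :: acc).reverse).getLastD [] = _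
      simp
    | cons c rest =>
      by_cases hc : c = '.'
      · subst hc
        have hpre : (['.'] : List Char).isPrefixOf ('.' :: rest) = true := by
          simp [List.isPrefixOf]
        show (if (['.'] : List Char).isPrefixOf ('.' :: rest) = true then
            PySem.Chars.splitOn.go ['.'] fuel (List.drop (List.length ['.']) ('.' :: rest)) [] (cur.reverse :: acc)
          else PySem.Chars.splitOn.go ['.'] fuel rest ('.' :: cur) acc).getLastD [] = _
        rw [if_pos hpre]
        simp only [List.length_singleton, List.drop_succ_cons, List.drop_zero]
        rw [ih rest [] (cur.reverse :: acc) (by simpa using Nat.lt_of_succ_lt_succ h)]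
        by_cases hr : '.' ∈ rest
        · simp [hr, pvLastSeg_cons_of_dot '.' rest hr]
        · simp [hr, pvLastSeg_dot_cons rest hr]
      · have hc' : ¬('.' = c) := fun h' => hc h'.symm
        have hpre : (['.'] : List Char).isPrefixOf (c :: rest) = false := by
          simp [List.isPrefixOf]
          exact hc'
        show (if (['.'] : List Char).isPrefixOf (c :: rest) = true then
            PySem.Chars.splitOn.go ['.'] fuel (List.drop (List.length ['.']) (c :: rest)) [] (cur.reverse :: acc)
          else PySem.Chars.splitOn.go ['.'] fuel rest (c :: cur) acc).getLastD [] = _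
        rw [hpre]
        simp only [Bool.false_eq_true, if_false]
        rw [ih rest (c :: cur) acc (by simpa using Nat.lt_of_succ_lt_succ h)]
        by_cases hr : '.' ∈ rest
        · simp [hr, hc', pvLastSeg_cons_of_dot c rest hr]
        · simp [hr, hc']

-- A's strip of a dotted token is the last segment; of an undotted token, the token
theorem pvStripTok_eq (t : List Char) : pvStripTok t = if '.' ∈ t then pvLastSeg t else t := by
  unfold pvStripTok
  have hisin : PySem.Chars.isIn ['.'] t = true ↔ '.' ∈ t := by
    rw [PySem.Chars.isIn_iff_infix]
    constructor
    · intro h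
      exact h.mem (by simp)
    · intro h
      obtain ⟨s, u, rfl⟩ := List.append_of_mem h
      exact ⟨s, u, by simp⟩
  by_cases h : '.' ∈ t
  · rw [if_pos (hisin.mpr h), if_pos h]
    show (PySem.Chars.splitOn.go ['.'] (t.length + 1) t [] []).getLastD [] = _
    rw [pvGo_last (t.length + 1) t [] [] (by omega)]
    simp [h]
  · rw [if_neg (fun hh => h (hisin.mp hh)), if_neg h]

theorem pvStripTok_nil : pvStripTok [] = [] := by decide

theorem pvStripTok_snoc_dot (t : List Char) : pvStripTok (t ++ ['.']) = [] := by
  rw [pvStripTok_eq, if_pos (by simp), pvLastSeg_snoc_dot]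

theorem pvStripTok_snoc (t : List Char) (c : Char) (hc : c ≠ '.') :
    pvStripTok (t ++ [c]) = pvStripTok t ++ [c] := by
  rw [pvStripTok_eq, pvStripTok_eq]
  by_cases h : '.' ∈ t
  · rw [if_pos (by simp [h]), if_pos h, pvLastSeg_snoc t c hc]
  · rw [if_neg (by simp [h, Ne.symm hc]), if_neg h]

-- a word character other than '.' passes B's pop test
theorem pvKey_to_popKey (c : Char) (hk : pvKey c = true) (hne : c ≠ '.') :
    pvPopKey c = true := by
  unfold pvKey at hk
  unfold pvPopKey
  rcases Bool.or_eq_true_iff.mp hk with h' | h'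
  · rcases Bool.or_eq_true_iff.mp h' with h'' | h''
    · rcases Bool.or_eq_true_iff.mp h'' with h3 | h3
      · simp [h3]
      · exact absurd (by simpa using h3) hne
    · simp [h'']
  · simp [h']

-- a non-word character fails B's pop test
theorem pvNotKey_popKey (c : Char) (hk : ¬ pvKey c = true) : pvPopKey c = false := by
  unfold pvKey at hk
  simp only [Bool.or_eq_true, not_or, Bool.not_eq_true] at hk
  obtain ⟨⟨⟨h1, h2⟩, h3⟩, h4⟩ := hk
  simp [pvPopKey, h1, h3, h4]

theorem pvStripTok_popKey (t : List Char) (hall : ∀ c ∈ t, pvKey c = true) :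
    ∀ c ∈ pvStripTok t, pvPopKey c = true := by
  rw [pvStripTok_eq]
  by_cases h : '.' ∈ t
  · rw [if_pos h]
    intro c hc
    have hc' : c ∈ t.reverse.takeWhile pvNotDot := by
      simpa [pvLastSeg] using hc
    have hmem : c ∈ t :=
      List.mem_reverse.mp ((List.takeWhile_prefix pvNotDot).subset hc')
    have hne : c ≠ '.' := by
      have := List.mem_takeWhile_imp hc'
      simpa [pvNotDot] using this
    exact pvKey_to_popKey c (hall c hmem) hne
  · rw [if_neg h]
    intro c hc
    exact pvKey_to_popKey c (hall c hc) (fun hEq => h (hEq ▸ hc))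

-- popping a run of word chars off the stack stops exactly at the old material
theorem pvPop_run (S : List Char) (hS : ∀ c ∈ S, pvPopKey c = true) (r : List Char)
    (hr : ∀ c, r.head? = some c → pvPopKey c = false) :
    pvPop (S ++ r) = r := by
  induction S with
  | nil =>
    cases r with
    | nil => rfl
    | cons c cs =>
      have : pvPopKey c = false := hr c rfl
      simp [pvPop, this]
  | cons c S ih =>
    have : pvPopKey c = true := hS c (by simp)
    simp only [List.cons_append, pvPop, this, if_true]
    exact ih (fun x hx => hS x (List.mem_cons_of_mem c hx))

-- main invariant: A's (res, tok) state corresponds to B's stack (res ++ strip tok).reverse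
theorem pvMain : ∀ (cs res tok : List Char),
    (∀ c ∈ tok, pvKey c = true) →
    (∀ c, res.getLast? = some c → pvPopKey c = false) →
    pvALoop cs res tok = pvBLoop cs (res ++ pvStripTok tok).reverse := by
  intro cs
  induction cs with
  | nil =>
    intro res tok htok hres
    by_cases h : tok.isEmpty
    · have h0 : tok = [] := by simpa [List.isEmpty_iff] using h
      subst h0
      simp [pvALoop, pvBLoop, pvStripTok_nil]
    · simp [pvALoop, h, pvBLoop]
  | cons c cs ih =>
    intro res tok htok hres
    by_cases hdot : c = '.'
    · subst hdot
      have hkey : pvKey '.' = true := by decide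
      simp only [pvALoop, hkey, if_true, pvBLoop, beq_self_eq_true, if_true]
      rw [ih res (tok ++ ['.'])
        (by intro x hx
            rcases List.mem_append.mp hx with h | h
            · exact htok x h
            · rw [List.mem_singleton.mp h]; exact hkey)
        hres]
      congr 1
      rw [pvStripTok_snoc_dot, List.append_nil]
      rw [List.reverse_append]
      rw [pvPop_run (pvStripTok tok).reverse
        (by intro x hx; exact pvStripTok_popKey tok htok x (List.mem_reverse.mp hx))
        res.reverse
        (by intro x hx
            apply hres
            rwa [List.head?_reverse] at hx)]
    · by_cases hk : pvKey c
      · simp only [pvALoop, hk, if_true, pvBLoop, beq_iff_eq, hdot, if_false]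
        rw [ih res (tok ++ [c])
          (by intro x hx
              rcases List.mem_append.mp hx with h | h
              · exact htok x h
              · rw [List.mem_singleton.mp h]; exact hk)
          hres]
        congr 1
        rw [pvStripTok_snoc tok c hdot]
        simp
      · simp only [pvALoop, hk, Bool.false_eq_true, if_false, pvBLoop, beq_iff_eq, hdot,
          if_false]
        rw [ih (res ++ pvStripTok tok ++ [c]) [] (by simp)
          (by intro x hx
              rw [List.append_assoc, List.getLast?_append, List.getLast?_concat] at hx
              simp only [Option.some_or, Option.some.injEq] at hx
              subst hx
              exact pvNotKey_popKey c hk)]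
        rw [pvStripTok_nil, List.append_nil]
        congr 1
        simp [List.reverse_append]

-- ===== VERDICT (by name: the statement is the Claim_ definition above) =====
theorem remove_module_names_spec : Claim_equal_remove_module_names := by
  intro typ _
  unfold Spec_remove_module_names remove_module_names remove_module_names_alt
  rw [pvMain typ.toList [] [] (by simp) (by simp)]
  rw [pvStripTok_nil]
  rfl
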